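-- pv_equiv track=rewrite | github.com/BrettRey/erdos-problem-993 | analyze_support_vertex.py | max_is_avoiding_v2
-- ===== SOURCE A (Python) =====
-- def max_is_avoiding_v2(n, adj, forbidden):
--     """Find the maximum size of a MAXIMAL IS that avoids `forbidden`.
--
--     A maximal IS cannot be extended by adding any vertex (including
--     forbidden ones that aren't in the IS).
--     """
--     nbr = [set(adj[v]) for v in range(n)]
--     best = [0]
--
--     def backtrack(v, current, blocked):
--         if v == n:
--             s = frozenset(current)
--             # Check maximality: no vertex (including forbidden) can be added
--             can_extend = any(u not in s and not (nbr[u] & s) for u in range(n))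
--             if not can_extend:
--                 best[0] = max(best[0], len(current))
--             return
--         # Skip v
--         backtrack(v + 1, current, blocked)
--         # Include v (only if allowed and not blocked)
--         if v not in forbidden and v not in blocked:
--             backtrack(v + 1, current + [v], blocked | nbr[v])
--
--     backtrack(0, [], set())
--     return best[0]
-- ===== SOURCE B (Python) =====
-- def max_is_avoiding_v2(n, adj, forbidden):
--     """Find the maximum size of a MAXIMAL IS that avoids `forbidden`.
--
--     Flat enumeration: scan every bitmask over the n vertices, keep the
--     decoded set when it avoids `forbidden`, is independent, and is
--     maximal (no vertex, forbidden or not, can still be added).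
--     """
--     best = 0
--     for mask in range(1 << n):
--         S = [v for v in range(n) if (mask >> v) & 1]
--         if any(v in forbidden for v in S):
--             continue
--         if not _independent(S, adj):
--             continue
--         if any(u not in S and not any(x in S for x in adj[u]) for u in range(n)):
--             continue  # some vertex could still be added: not maximal
--         best = max(best, len(S))
--     return best
--
--
-- def _independent(S, adj):
--     rest = S
--     while rest:
--         u, rest = rest[0], rest[1:]
--         if any(w in adj[u] for w in rest):
--             return False
--     return True
-- ===== Notes on version B (the rewrite author's own statement) =====
-- stated objective: alternative
-- what changed: Replaces the recursive include/skip backtracking (mutable best cell, incremental blocked-set pruning) with a flat loop over all 2^n bitmasks that decodes each mask into a vertex list and filters it by forbidden-avoidance, independence and maximality.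
import Mathlib
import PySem

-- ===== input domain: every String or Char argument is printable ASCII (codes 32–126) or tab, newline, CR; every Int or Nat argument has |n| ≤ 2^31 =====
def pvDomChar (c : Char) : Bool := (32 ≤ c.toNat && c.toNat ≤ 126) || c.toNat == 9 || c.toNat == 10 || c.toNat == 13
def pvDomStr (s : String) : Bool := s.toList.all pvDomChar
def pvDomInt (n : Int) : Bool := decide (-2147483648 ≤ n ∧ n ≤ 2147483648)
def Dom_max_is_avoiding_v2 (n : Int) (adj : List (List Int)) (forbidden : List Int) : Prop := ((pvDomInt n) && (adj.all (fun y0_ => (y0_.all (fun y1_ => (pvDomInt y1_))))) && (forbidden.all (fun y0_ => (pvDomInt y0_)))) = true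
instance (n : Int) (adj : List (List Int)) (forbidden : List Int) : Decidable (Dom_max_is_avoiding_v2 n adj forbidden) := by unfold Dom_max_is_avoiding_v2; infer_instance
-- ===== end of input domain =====

-- B replaces A's recursive include/skip backtracking by a flat scan of all 2^n bitmasks,
-- filtering each decoded vertex set for forbidden-avoidance, independence and maximality
-- (objective: alternative decomposition, same exact result).

-- ===== PORT A =====
-- leaf of the backtracking: 's = frozenset(current)', the maximality test, and 'best[0] = max(best[0], len(current))'
def pvLeafA (m : Nat) (nbr : List (PySem.Set Int)) (current : List Int) (best : Int) : Int :=
  let s : PySem.Set Int := PySem.Set.ofList current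
  if (List.range m).any (fun u =>
      !(PySem.Set.contains s (u : Int)) &&
      ((PySem.Set.inter (nbr.getD u PySem.Set.empty) s).isEmpty)) then
    best
  else
    max best (current.length : Int)

-- 'def backtrack(v, current, blocked)': structural recursion on the fuel k = n - v
def pvBacktrackA (m : Nat) (nbr : List (PySem.Set Int)) (forbidden : List Int) :
    Nat → Int → List Int → PySem.Set Int → Int → Int
  | 0, _v, current, _blocked, best => pvLeafA m nbr current best
  | k+1, v, current, blocked, best =>
    let b1 := pvBacktrackA m nbr forbidden k (v+1) current blocked best
    if !(forbidden.contains v) && !(PySem.Set.contains blocked v) then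
      pvBacktrackA m nbr forbidden k (v+1) (current ++ [v])
        (PySem.Set.union blocked (nbr.getD v.toNat PySem.Set.empty)) b1
    else b1

def max_is_avoiding_v2 (n : Int) (adj : List (List Int)) (forbidden : List Int) : Int :=
  let m := n.toNat
  let nbr : List (PySem.Set Int) := (List.range m).map (fun v => PySem.Set.ofList (adj.getD v []))
  pvBacktrackA m nbr forbidden m 0 [] PySem.Set.empty 0

-- ===== PORT B =====
-- helper '_independent(S, adj)' of Source B
def pvIndependent (adj : List (List Int)) : List Int → Bool
  | [] => true
  | u :: rest =>
    if rest.any (fun w => (adj.getD u.toNat []).contains w) then false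
    else pvIndependent adj rest

def max_is_avoiding_v2_alt (n : Int) (adj : List (List Int)) (forbidden : List Int) : Int :=
  let m := n.toNat
  (List.range (2 ^ m)).foldl (fun best mask =>
    let S : List Int := (List.range m).filterMap
      (fun (v : Nat) => if (mask >>> v) &&& 1 == 1 then some (v : Int) else none)
    if S.any (fun v => forbidden.contains v) then best
    else if !(pvIndependent adj S) then best
    else if (List.range m).any (fun u =>
        !(S.contains (u : Int)) && !((adj.getD u []).any (fun x => S.contains x))) then best
    else max best (S.length : Int)) 0

-- ===== PRECONDITION & SPEC =====
-- Pre_ excludes exactly the inputs where A does not return: n > len(adj) (IndexError building nbr)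
-- and n < 0 (the recursion on v never reaches n: RecursionError).
def Pre_max_is_avoiding_v2 (n : Int) (adj : List (List Int)) (forbidden : List Int) : Prop :=
  0 ≤ n ∧ n ≤ (adj.length : Int)
instance (n : Int) (adj : List (List Int)) (forbidden : List Int) : Decidable (Pre_max_is_avoiding_v2 n adj forbidden) := by unfold Pre_max_is_avoiding_v2; infer_instance
def pvWitness_max_is_avoiding_v2 : Int × List (List Int) × List Int := (2, [[1], [0]], [0])

def Spec_max_is_avoiding_v2 (n : Int) (adj : List (List Int)) (forbidden : List Int) (out : Int) : Prop := out = max_is_avoiding_v2_alt n adj forbidden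
instance (n : Int) (adj : List (List Int)) (forbidden : List Int) (out : Int) : Decidable (Spec_max_is_avoiding_v2 n adj forbidden out) := by unfold Spec_max_is_avoiding_v2; infer_instance

-- ===== CLAIM (what is proved, stated in full; the proofs are below) =====
def Claim_equal_max_is_avoiding_v2 : Prop := ∀ (n : Int) (adj : List (List Int)) (forbidden : List Int), Dom_max_is_avoiding_v2 n adj forbidden → Pre_max_is_avoiding_v2 n adj forbidden → Spec_max_is_avoiding_v2 n adj forbidden (max_is_avoiding_v2 n adj forbidden)

-- ===== LEMMAS AND PROOFS =====

-- max-accumulating fold over candidate vertex lists, the common shape of both programs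
def pvFmax (p : List Int → Bool) (l : List (List Int)) (b : Int) : Int :=
  l.foldl (fun acc S => if p S then max acc (S.length : Int) else acc) b

-- A's maximality predicate at a leaf (as a Bool on the candidate list)
def pvPA (m : Nat) (nbr : List (PySem.Set Int)) (S : List Int) : Bool :=
  !((List.range m).any (fun u =>
      !(PySem.Set.contains (PySem.Set.ofList S) (u : Int)) &&
      ((PySem.Set.inter (nbr.getD u PySem.Set.empty) (PySem.Set.ofList S)).isEmpty)))

-- B's combined filter: avoids forbidden, independent, maximal
def pvPB (m : Nat) (adj : List (List Int)) (forbidden : List Int) (S : List Int) : Bool :=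
  !(S.any (fun v => forbidden.contains v)) && pvIndependent adj S &&
  !((List.range m).any (fun u =>
      !(S.contains (u : Int)) && !((adj.getD u []).any (fun x => S.contains x))))

-- the leaves visited by A's backtracking, in visiting order
def pvExts (nbr : List (PySem.Set Int)) (forbidden : List Int) :
    Nat → Int → List Int → PySem.Set Int → List (List Int)
  | 0, _v, current, _blocked => [current]
  | k+1, v, current, blocked =>
    pvExts nbr forbidden k (v+1) current blocked ++
    (if !(forbidden.contains v) && !(PySem.Set.contains blocked v) then
       pvExts nbr forbidden k (v+1) (current ++ [v])
         (PySem.Set.union blocked (nbr.getD v.toNat PySem.Set.empty))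
     else [])

-- strictly increasing list with entries in [lo, hi)
def pvInc (hi : Int) : Int → List Int → Prop
  | _lo, [] => True
  | lo, t :: T => lo ≤ t ∧ t < hi ∧ pvInc hi (t+1) T

-- A's inclusion condition along a chain of chosen vertices
def pvOk (nbr : List (PySem.Set Int)) (forbidden : List Int) :
    PySem.Set Int → List Int → Bool
  | _blocked, [] => true
  | blocked, t :: T =>
    !(forbidden.contains t) && !(PySem.Set.contains blocked t) &&
    pvOk nbr forbidden (PySem.Set.union blocked (nbr.getD t.toNat PySem.Set.empty)) T

lemma pvFmax_append (p : List Int → Bool) (l1 l2 : List (List Int)) (b : Int) :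
    pvFmax p (l1 ++ l2) b = pvFmax p l2 (pvFmax p l1 b) := by
  simp [pvFmax, List.foldl_append]

lemma pvFmax_le_iff (p : List Int → Bool) (l : List (List Int)) (b c : Int) :
    pvFmax p l b ≤ c ↔ b ≤ c ∧ ∀ S ∈ l, p S = true → (S.length : Int) ≤ c := by
  induction l generalizing b with
  | nil => simp [pvFmax]
  | cons S l ih =>
    show pvFmax p l (if p S then max b _ else b) ≤ c ↔ _
    rw [ih]
    by_cases h : p S = true <;> simp [h] <;> tauto

lemma pvFmax_eq_of_mem_iff (p : List Int → Bool) (l1 l2 : List (List Int)) (b : Int)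
    (h : ∀ S, (S ∈ l1 ∧ p S = true) ↔ (S ∈ l2 ∧ p S = true)) :
    pvFmax p l1 b = pvFmax p l2 b := by
  have h1 := (pvFmax_le_iff p l1 b _).mp (le_refl _)
  have h2 := (pvFmax_le_iff p l2 b _).mp (le_refl _)
  apply le_antisymm
  · exact (pvFmax_le_iff p l1 b _).mpr
      ⟨h2.1, fun S hS hp => h2.2 S ((h S).mp ⟨hS, hp⟩).1 hp⟩
  · exact (pvFmax_le_iff p l2 b _).mpr
      ⟨h1.1, fun S hS hp => h1.2 S ((h S).mpr ⟨hS, hp⟩).1 hp⟩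

lemma pvFmax_congr (p q : List Int → Bool) (l : List (List Int)) (b : Int)
    (h : ∀ S ∈ l, p S = q S) : pvFmax p l b = pvFmax q l b := by
  induction l generalizing b with
  | nil => rfl
  | cons S l ih =>
    show pvFmax p l (if p S = true then max b (S.length : Int) else b) =
      pvFmax q l (if q S = true then max b (S.length : Int) else b)
    rw [h S (by simp), ih _ (fun S hS => h S (List.mem_cons_of_mem _ hS))]

lemma pvBacktrackA_eq_fmax (m : Nat) (nbr : List (PySem.Set Int)) (forbidden : List Int) :
    ∀ (k : Nat) (v : Int) (current : List Int) (blocked : PySem.Set Int) (best : Int),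
    pvBacktrackA m nbr forbidden k v current blocked best =
      pvFmax (pvPA m nbr) (pvExts nbr forbidden k v current blocked) best := by
  intro k
  induction k with
  | zero =>
    intro v current blocked best
    show (if ((List.range m).any (fun u =>
        !(PySem.Set.contains (PySem.Set.ofList current) (u : Int)) &&
        ((PySem.Set.inter (nbr.getD u PySem.Set.empty) (PySem.Set.ofList current)).isEmpty))) then best
      else max best (current.length : Int)) =
      (if pvPA m nbr current then max best (current.length : Int) else best)
    cases hc : ((List.range m).any (fun u =>
        !(PySem.Set.contains (PySem.Set.ofList current) (u : Int)) &&
        ((PySem.Set.inter (nbr.getD u PySem.Set.empty) (PySem.Set.ofList current)).isEmpty))) <;>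
      simp only [pvPA, hc, Bool.not_true, Bool.not_false, if_true, if_false, Bool.false_eq_true]
  | succ k ih =>
    intro v current blocked best
    simp only [pvBacktrackA, pvExts, pvFmax_append]
    by_cases hc : (!(forbidden.contains v) && !(PySem.Set.contains blocked v)) = true
    · rw [if_pos hc, if_pos hc, ih, ih]
    · rw [if_neg hc, if_neg hc, ih]
      rfl

lemma pvInc_bounds (hi : Int) : ∀ (S : List Int) (lo : Int), pvInc hi lo S →
    ∀ t ∈ S, lo ≤ t ∧ t < hi := by
  intro S
  induction S with
  | nil => intro lo _ t ht; simp at ht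
  | cons s S ih =>
    rintro lo ⟨h1, h2, h3⟩ t ht
    rcases List.mem_cons.mp ht with rfl | ht'
    · exact ⟨h1, h2⟩
    · have := ih _ h3 t ht'; exact ⟨by omega, this.2⟩

lemma pvInc_mono (hi : Int) (S : List Int) (lo lo' : Int) (h : lo ≤ lo')
    (hS : pvInc hi lo' S) : pvInc hi lo S := by
  cases S with
  | nil => trivial
  | cons s S => obtain ⟨h1, h2, h3⟩ := hS; exact ⟨le_trans h h1, h2, h3⟩

lemma mem_pvExts (nbr : List (PySem.Set Int)) (forbidden : List Int) :
    ∀ (k : Nat) (v : Int) (current : List Int) (blocked : PySem.Set Int) (S : List Int),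
    S ∈ pvExts nbr forbidden k v current blocked ↔
      ∃ T, S = current ++ T ∧ pvInc (v + k) v T ∧ pvOk nbr forbidden blocked T = true := by
  intro k
  induction k with
  | zero =>
    intro v current blocked S
    simp only [pvExts, List.mem_singleton]
    constructor
    · rintro rfl; exact ⟨[], by simp, trivial, rfl⟩
    · rintro ⟨T, rfl, hinc, hok⟩
      cases T with
      | nil => simp
      | cons t T =>
        obtain ⟨h1, h2, _⟩ := hinc
        exfalso; push_cast at h2; omega
  | succ k ih =>
    intro v current blocked S
    have hcast : v + ((k+1 : Nat) : Int) = (v+1) + (k : Int) := by push_cast; ring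
    simp only [pvExts, List.mem_append]
    by_cases hc : (!(forbidden.contains v) && !(PySem.Set.contains blocked v)) = true
    · rw [if_pos hc]
      constructor
      · rintro (h | h) <;> rw [ih] at h <;> obtain ⟨T, hS, hinc, hok⟩ := h
        · have hx := pvInc_mono _ T v (v+1) (by omega) hinc
          rw [← hcast] at hx
          exact ⟨T, hS, hx, hok⟩
        · refine ⟨v :: T, by simpa using hS, ?_, ?_⟩
          · refine ⟨le_refl v, by push_cast; omega, ?_⟩
            rw [hcast]; exact hinc
          · simp only [pvOk, hc, Bool.true_and]; exact hok
      · rintro ⟨T, hS, hinc, hok⟩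
        cases T with
        | nil => left; rw [ih]; exact ⟨[], by simpa using hS, trivial, rfl⟩
        | cons t T =>
          obtain ⟨h1, h2, h3⟩ := hinc
          rcases eq_or_lt_of_le h1 with rfl | hlt
          · right; rw [ih]
            simp only [pvOk] at hok
            rw [Bool.and_eq_true] at hok
            refine ⟨T, by simpa using hS, ?_, hok.2⟩
            rw [hcast] at h3; exact h3
          · left; rw [ih]
            refine ⟨t :: T, hS, ⟨by omega, by rw [← hcast]; exact h2, by rw [← hcast]; exact h3⟩, hok⟩
    · rw [if_neg hc]
      simp only [List.not_mem_nil, or_false]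
      rw [ih]
      constructor
      · rintro ⟨T, hS, hinc, hok⟩
        have hx := pvInc_mono _ T v (v+1) (by omega) hinc
        rw [← hcast] at hx
        exact ⟨T, hS, hx, hok⟩
      · rintro ⟨T, hS, hinc, hok⟩
        cases T with
        | nil => exact ⟨[], hS, trivial, rfl⟩
        | cons t T =>
          obtain ⟨h1, h2, h3⟩ := hinc
          rcases eq_or_lt_of_le h1 with rfl | hlt
          · exfalso
            simp only [pvOk] at hok
            rw [Bool.and_eq_true] at hok
            exact hc hok.1
          · refine ⟨t :: T, hS, ⟨by omega, by rw [← hcast]; exact h2, by rw [← hcast]; exact h3⟩, hok⟩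

lemma pvNbr_getD (adj : List (List Int)) (m u : Nat) (hu : u < m) :
    ((List.range m).map (fun v => PySem.Set.ofList (adj.getD v []))).getD u PySem.Set.empty =
      PySem.Set.ofList (adj.getD u []) := by
  simp [List.getD_eq_getElem?_getD, hu]

lemma pvOk_iff (adj : List (List Int)) (forbidden : List Int) (m : Nat) :
    ∀ (S : List Int) (blocked : PySem.Set Int),
    (∀ t ∈ S, 0 ≤ t ∧ t < (m : Int)) →
    (pvOk ((List.range m).map (fun v => PySem.Set.ofList (adj.getD v []))) forbidden blocked S = true ↔
      (∀ t ∈ S, t ∉ forbidden) ∧ (∀ t ∈ S, t ∉ blocked) ∧ pvIndependent adj S = true) := by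
  intro S
  induction S with
  | nil => intro blocked _; simp [pvOk, pvIndependent]
  | cons t T ih =>
    intro blocked hb
    have ht := hb t (by simp)
    have htT : ∀ x ∈ T, 0 ≤ x ∧ x < (m : Int) := fun x hx => hb x (by simp [hx])
    have htm : t.toNat < m := by omega
    simp only [pvOk, pvNbr_getD adj m t.toNat htm, Bool.and_eq_true]
    rw [ih _ htT]
    simp only [pvIndependent, List.forall_mem_cons, Bool.not_eq_true',
      PySem.Set.mem_union, PySem.Set.mem_ofList]
    constructor
    · rintro ⟨⟨hf, hbl⟩, hTf, hTb, hTi⟩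
      refine ⟨⟨by simpa using hf, hTf⟩, ⟨by simpa using hbl, fun x hx => (hTb x hx ∘ Or.inl)⟩, ?_⟩
      have hno : (T.any fun w => (adj.getD t.toNat []).contains w) = false := by
        rw [List.any_eq_false]
        intro w hw
        simp only [Bool.not_eq_true, List.contains_eq_mem, decide_eq_false_iff_not]
        exact fun hmem => hTb w hw (Or.inr hmem)
      simp only [hno, Bool.false_eq_true, if_false, hTi]
    · rintro ⟨⟨hf, hTf⟩, ⟨hbl, hTb⟩, hti⟩
      have hsplit : (T.any fun w => (adj.getD t.toNat []).contains w) = false ∧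
          pvIndependent adj T = true := by
        by_cases hany : (T.any fun w => (adj.getD t.toNat []).contains w) = true
        · simp only [hany, if_true] at hti
          exact (Bool.false_ne_true hti).elim
        · simp only [Bool.not_eq_true] at hany
          simp only [hany, Bool.false_eq_true, if_false] at hti
          exact ⟨hany, hti⟩
      refine ⟨⟨by simpa using hf, by simpa using hbl⟩, hTf, ?_, hsplit.2⟩
      intro x hx
      rintro (hxb | hxn)
      · exact hTb x hx hxb
      · exact (List.any_eq_false.mp hsplit.1 x hx)
          (by simp only [List.contains_eq_mem, decide_eq_true_eq]; exact hxn)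

lemma pvPA_point (adj : List (List Int)) (m u : Nat) (S : List Int) (hu : u < m) :
    (!(PySem.Set.contains (PySem.Set.ofList S) (u : Int)) &&
      ((PySem.Set.inter
        (((List.range m).map (fun v => PySem.Set.ofList (adj.getD v []))).getD u PySem.Set.empty)
        (PySem.Set.ofList S)).isEmpty)) =
    (!(S.contains (u : Int)) && !((adj.getD u []).any (fun x => S.contains x))) := by
  rw [pvNbr_getD adj m u hu, Bool.eq_iff_iff]
  simp only [Bool.and_eq_true, Bool.not_eq_true', List.isEmpty_iff,
    List.eq_nil_iff_forall_not_mem, PySem.Set.mem_inter, PySem.Set.mem_ofList,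
    List.any_eq_false, PySem.Set.contains_eq_listContains, List.contains_eq_mem,
    decide_eq_false_iff_not, decide_eq_true_eq]
  constructor
  · rintro ⟨h1, h2⟩
    exact ⟨h1, fun x hx hmem => h2 x ⟨hx, hmem⟩⟩
  · rintro ⟨h1, h2⟩
    exact ⟨h1, fun x ⟨hx1, hx2⟩ => h2 x hx1 hx2⟩

lemma pvPA_eq_pvPB_maximal (adj : List (List Int)) (m : Nat) (S : List Int) :
    pvPA m ((List.range m).map (fun v => PySem.Set.ofList (adj.getD v []))) S =
      !((List.range m).any (fun u =>
        !(S.contains (u : Int)) && !((adj.getD u []).any (fun x => S.contains x)))) := by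
  simp only [pvPA]
  refine congrArg (fun b => !b) ?_
  rw [Bool.eq_iff_iff]
  simp only [List.any_eq_true, List.mem_range]
  constructor
  · rintro ⟨u, hu, hcond⟩
    exact ⟨u, hu, by rw [← pvPA_point adj m u S hu]; exact hcond⟩
  · rintro ⟨u, hu, hcond⟩
    exact ⟨u, hu, by rw [pvPA_point adj m u S hu]; exact hcond⟩

-- decode of a bitmask; bits condition written exactly as in port B
def pvDecode (m : Nat) (mask : Nat) : List Int :=
  (List.range m).filterMap (fun (v : Nat) => if (mask >>> v) &&& 1 == 1 then some (v : Int) else none)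

lemma pvBit_eq_testBit (mask v : Nat) :
    ((mask >>> v) &&& 1 == 1) = Nat.testBit mask v := by
  rw [Bool.eq_iff_iff]
  simp [Nat.and_one_is_mod, Nat.shiftRight_eq_div_pow, Nat.testBit_eq_decide_div_mod_eq]

lemma pvDecode_inc (g : Nat → Bool) :
    ∀ (len lo : Nat), pvInc ((lo : Int) + (len : Int)) (lo : Int)
      ((List.range' lo len).filterMap (fun i => if g i then some (i : Int) else none)) := by
  intro len
  induction len with
  | zero => intro lo; simp only [List.range']; exact trivial
  | succ len ih =>
    intro lo
    rw [List.range'_succ, List.filterMap_cons]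
    have hc : ((lo+1 : Nat) : Int) + (len : Int) = (lo : Int) + ((len+1 : Nat) : Int) := by
      push_cast; ring
    have hc2 : ((lo+1 : Nat) : Int) = (lo : Int) + 1 := by push_cast; ring
    have h := ih (lo+1)
    rw [hc, hc2] at h
    cases hg : g lo
    · simp only [Bool.false_eq_true, if_false]
      exact pvInc_mono _ _ _ _ (by omega) h
    · simp only [if_true]
      exact ⟨le_refl _, by push_cast; omega, h⟩

lemma pvDecode_eq_self (g : Nat → Bool) :
    ∀ (len lo : Nat) (S : List Int), pvInc ((lo : Int) + (len : Int)) (lo : Int) S →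
    (∀ i ∈ List.range' lo len, g i = decide ((i : Int) ∈ S)) →
    (List.range' lo len).filterMap (fun i => if g i then some (i : Int) else none) = S := by
  intro len
  induction len with
  | zero =>
    intro lo S hinc _
    cases S with
    | nil => simp [List.range']
    | cons t T =>
      obtain ⟨h1, h2, _⟩ := hinc
      exfalso; push_cast at h2; omega
  | succ len ih =>
    intro lo S hinc hg
    have hc : ((lo+1 : Nat) : Int) + (len : Int) = (lo : Int) + ((len+1 : Nat) : Int) := by
      push_cast; ring
    have hc2 : ((lo+1 : Nat) : Int) = (lo : Int) + 1 := by push_cast; ring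
    rw [List.range'_succ, List.filterMap_cons]
    cases S with
    | nil =>
      have hall : ∀ i ∈ List.range' lo (len+1), g i = false := by
        intro i hi; rw [hg i hi]; simp
      have hhead : g lo = false := hall lo (by rw [List.range'_succ]; simp)
      simp only [hhead, Bool.false_eq_true, if_false]
      rw [List.filterMap_eq_nil_iff]
      intro i hi
      simp [hall i (by rw [List.range'_succ]; exact List.mem_cons_of_mem _ hi)]
    | cons t T =>
      obtain ⟨h1, h2, h3⟩ := hinc
      have hTb := pvInc_bounds _ T _ h3
      rcases eq_or_lt_of_le h1 with heq | hlt
      · have hghead : g lo = true := by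
          rw [hg lo (by rw [List.range'_succ]; simp)]
          simp [← heq]
        simp only [hghead, if_true]
        have hT : List.filterMap (fun i => if g i then some (i : Int) else none)
            (List.range' (lo+1) len) = T := by
          apply ih
          · rw [hc, hc2]
            rw [← heq] at h3
            exact h3
          · intro i hi
            rw [hg i (by rw [List.range'_succ]; exact List.mem_cons_of_mem _ hi)]
            have hi' := List.mem_range'_1.mp hi
            have hne : (i : Int) ≠ t := by
              rw [← heq]
              exact_mod_cast (by omega : i ≠ lo)
            simp [List.mem_cons, hne]
        rw [hT, heq]
      · have hghead : g lo = false := by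
          rw [hg lo (by rw [List.range'_succ]; simp)]
          simp only [decide_eq_false_iff_not, List.mem_cons]
          rintro (h | h)
          · omega
          · have := hTb _ h; omega
        simp only [hghead, Bool.false_eq_true, if_false]
        apply ih
        · rw [hc, hc2]
          exact ⟨by omega, h2, h3⟩
        · intro i hi
          exact hg i (by rw [List.range'_succ]; exact List.mem_cons_of_mem _ hi)

lemma pvMask_exists (hi : Int) :
    ∀ (S : List Int) (lo : Nat), pvInc hi (lo : Int) S →
    ∃ q : Nat, ∀ i : Nat, Nat.testBit (2 ^ lo * q) i = decide ((i : Int) ∈ S) := by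
  intro S
  induction S with
  | nil => intro lo _; exact ⟨0, fun i => by simp⟩
  | cons t T ih =>
    intro lo hinc
    obtain ⟨h1, h2, h3⟩ := hinc
    have ht0 : (0 : Int) ≤ t := le_trans (Int.natCast_nonneg lo) h1
    have hta : ((t.toNat : Nat) : Int) = t := Int.toNat_of_nonneg ht0
    have hla : lo ≤ t.toNat := by omega
    have h3' : pvInc hi ((t.toNat + 1 : Nat) : Int) T := by
      rw [show ((t.toNat + 1 : Nat) : Int) = t + 1 by push_cast; omega]
      exact h3
    obtain ⟨q', hq'⟩ := ih (t.toNat + 1) h3'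
    refine ⟨2 ^ (t.toNat - lo) * (2 * q' + 1), fun i => ?_⟩
    have hmask : 2 ^ lo * (2 ^ (t.toNat - lo) * (2 * q' + 1)) =
        2 ^ (t.toNat + 1) * q' + 2 ^ t.toNat := by
      have hp : 2 ^ lo * 2 ^ (t.toNat - lo) = 2 ^ t.toNat := by
        rw [← pow_add]; congr 1; omega
      rw [← mul_assoc, hp, pow_succ]; ring
    rw [hmask, Nat.testBit_two_pow_mul_add q' (Nat.pow_lt_pow_succ (by norm_num))]
    by_cases hcase : i < t.toNat + 1
    · rw [if_pos hcase]
      rcases Nat.lt_succ_iff_lt_or_eq.mp hcase with hlt | rfl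
      · rw [Nat.testBit_two_pow_of_ne (by omega)]
        symm
        simp only [decide_eq_false_iff_not, List.mem_cons]
        rintro (h | h)
        · omega
        · have hb := (pvInc_bounds hi T (t+1) h3 _ h).1
          omega
      · rw [Nat.testBit_two_pow_self]
        symm
        simp [hta]
    · rw [if_neg hcase]
      have hge : t.toNat + 1 ≤ i := by omega
      have hthis := hq' i
      rw [Nat.testBit_two_pow_mul] at hthis
      simp only [ge_iff_le, hge, decide_true, Bool.true_and] at hthis
      rw [hthis]
      have hne : (i : Int) ≠ t := by omega
      simp [List.mem_cons, hne]

lemma pvAlt_eq_fmax (n : Int) (adj : List (List Int)) (forbidden : List Int) :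
    max_is_avoiding_v2_alt n adj forbidden =
      pvFmax (pvPB n.toNat adj forbidden)
        ((List.range (2 ^ n.toNat)).map (pvDecode n.toNat)) 0 := by
  simp only [max_is_avoiding_v2_alt, pvFmax, List.foldl_map, pvDecode]
  congr 1
  funext best mask
  cases h1 : ((List.range n.toNat).filterMap (fun (v : Nat) => if (mask >>> v) &&& 1 == 1 then some (v : Int) else none)).any (fun v => forbidden.contains v) <;>
  cases h2 : pvIndependent adj ((List.range n.toNat).filterMap (fun (v : Nat) => if (mask >>> v) &&& 1 == 1 then some (v : Int) else none)) <;>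
  cases h3 : (List.range n.toNat).any (fun u => !(((List.range n.toNat).filterMap (fun (v : Nat) => if (mask >>> v) &&& 1 == 1 then some (v : Int) else none)).contains (u : Int)) && !((adj.getD u []).any (fun x => ((List.range n.toNat).filterMap (fun (v : Nat) => if (mask >>> v) &&& 1 == 1 then some (v : Int) else none)).contains x))) <;>
    simp only [pvPB, h1, h2, h3, Bool.not_true, Bool.not_false, Bool.and_true, Bool.and_false,
      Bool.false_eq_true, if_true, if_false]

-- ===== VERDICT (by name: the statement is the Claim_ definition above) =====
theorem max_is_avoiding_v2_spec : Claim_equal_max_is_avoiding_v2 := by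
  intro n adj forbidden _hdom _hpre
  unfold Spec_max_is_avoiding_v2
  have hmem : ∀ S, S ∈ pvExts ((List.range n.toNat).map (fun v => PySem.Set.ofList (adj.getD v [])))
      forbidden n.toNat 0 [] PySem.Set.empty ↔
      (pvInc (n.toNat : Int) 0 S ∧
        pvOk ((List.range n.toNat).map (fun v => PySem.Set.ofList (adj.getD v []))) forbidden
          PySem.Set.empty S = true) := by
    intro S
    rw [mem_pvExts]
    constructor
    · rintro ⟨T, rfl, hinc, hok⟩
      rw [zero_add] at hinc
      exact ⟨hinc, hok⟩
    · rintro ⟨hinc, hok⟩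
      exact ⟨S, (List.nil_append S).symm, by rw [zero_add]; exact hinc, hok⟩
  have hbounds : ∀ S, pvInc (n.toNat : Int) 0 S → ∀ t ∈ S, 0 ≤ t ∧ t < (n.toNat : Int) :=
    fun S h => pvInc_bounds _ S 0 h
  have hA : max_is_avoiding_v2 n adj forbidden =
      pvFmax (pvPA n.toNat ((List.range n.toNat).map (fun v => PySem.Set.ofList (adj.getD v []))))
        (pvExts ((List.range n.toNat).map (fun v => PySem.Set.ofList (adj.getD v []))) forbidden
          n.toNat 0 [] PySem.Set.empty) 0 :=
    pvBacktrackA_eq_fmax n.toNat _ forbidden n.toNat 0 [] PySem.Set.empty 0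
  rw [hA]
  rw [pvFmax_congr (pvPA n.toNat _) (pvPB n.toNat adj forbidden) _ 0 ?pcong]
  case pcong =>
    intro S hS
    rw [hmem] at hS
    obtain ⟨hinc, hok⟩ := hS
    have hb := hbounds S hinc
    rw [pvOk_iff adj forbidden n.toNat S PySem.Set.empty hb] at hok
    obtain ⟨hf, _, hind⟩ := hok
    rw [pvPA_eq_pvPB_maximal adj n.toNat S]
    have hforb : (S.any fun v => forbidden.contains v) = false := by
      rw [List.any_eq_false]
      intro v hv
      simp only [Bool.not_eq_true, List.contains_eq_mem, decide_eq_false_iff_not]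
      exact hf v hv
    simp only [pvPB, hforb, hind, Bool.not_false, Bool.true_and]
  rw [pvFmax_eq_of_mem_iff (pvPB n.toNat adj forbidden) _
      ((List.range (2 ^ n.toNat)).map (pvDecode n.toNat)) 0 ?memiff]
  case memiff =>
    intro S
    constructor
    · rintro ⟨hS, hp⟩
      refine ⟨?_, hp⟩
      rw [hmem] at hS
      obtain ⟨hinc, hok⟩ := hS
      obtain ⟨q, hq⟩ := pvMask_exists (n.toNat : Int) S 0 (by rw [Nat.cast_zero]; exact hinc)
      rw [pow_zero, one_mul] at hq
      have hqlt : q < 2 ^ n.toNat := by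
        apply Nat.lt_pow_two_of_testBit
        intro i hi
        rw [hq i]
        simp only [decide_eq_false_iff_not]
        intro hmem'
        have := (hbounds S hinc _ hmem').2
        omega
      refine List.mem_map.mpr ⟨q, List.mem_range.mpr hqlt, ?_⟩
      rw [pvDecode, List.range_eq_range']
      apply pvDecode_eq_self
      · rw [Nat.cast_zero, zero_add]; exact hinc
      · intro i _
        rw [pvBit_eq_testBit, hq]
    · rintro ⟨hS, hp⟩
      refine ⟨?_, hp⟩
      obtain ⟨mask, _, rfl⟩ := List.mem_map.mp hS
      have hinc : pvInc (n.toNat : Int) 0 (pvDecode n.toNat mask) := by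
        have h := pvDecode_inc (fun v => (mask >>> v) &&& 1 == 1) n.toNat 0
        rw [Nat.cast_zero, zero_add] at h
        rw [pvDecode, List.range_eq_range']
        exact h
      rw [hmem]
      refine ⟨hinc, ?_⟩
      rw [pvOk_iff adj forbidden n.toNat _ PySem.Set.empty (hbounds _ hinc)]
      simp only [pvPB, Bool.and_eq_true, Bool.not_eq_true'] at hp
      obtain ⟨⟨hforb, hind⟩, _⟩ := hp
      refine ⟨?_, ?_, hind⟩
      · intro t ht
        have h := List.any_eq_false.mp hforb t ht
        simpa using h
      · intro t _
        simp [PySem.Set.empty]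
  rw [← pvAlt_eq_fmax]
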